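-- pv_equiv track=rewrite | github.com/Xraydylan/teco-minol-reader | minol_reader/minol_reader/ssocr.py | _helper_extract
-- ===== SOURCE A (Python) =====
-- def _helper_extract(one_d_array, threshold=10, distance=15, separation=10):
--     # original params threshold=20, distance=20, separation=12
--     res = []
--     flag = 0
--     temp = 0
--     separation_threshold = separation * 255
--     for i in range(len(one_d_array)):
--         if one_d_array[i] < separation_threshold:
--             if flag > threshold:
--                 start = i - flag
--                 end = i
--                 temp = end
--                 if end - start > distance:
--                     res.append((start, end))
--             flag = 0
--         else:
--             flag += 1
--
--     else:
--         if flag > threshold: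
--             start = temp
--             end = len(one_d_array)
--             if end - start > 50:
--                 res.append((start, end))
--     return res
-- ===== SOURCE B (Python) =====
-- def _helper_extract(one_d_array, threshold=10, distance=15, separation=10):
--     # Two-phase: first collect maximal runs of 'high' values, then classify each run.
--     sep = separation * 255
--     n = len(one_d_array)
--     runs = []
--     i = 0
--     while i < n:
--         if one_d_array[i] >= sep:
--             j = i + 1
--             while j < n and one_d_array[j] >= sep:
--                 j += 1
--             runs.append((i, j))
--             i = j
--         else:
--             i += 1
--     res = []
--     temp = 0
--     for (s, e) in runs:
--         if e < n:
--             if e - s > threshold: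
--                 temp = e
--                 if e - s > distance:
--                     res.append((s, e))
--         else:
--             if e - s > threshold and n - temp > 50:
--                 res.append((temp, n))
--     return res
-- ===== Notes on version B (the rewrite author's own statement) =====
-- stated objective: alternative
-- what changed: B first builds the list of maximal high-value runs in one scan and then classifies each run (interior vs trailing) in a second pass, instead of A's single index loop with a persistent flag counter.
-- outside the precondition, e.g. on _helper_extract([0], -1, -1, 1): A returns [(0, 0)], B returns []
import Mathlib
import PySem

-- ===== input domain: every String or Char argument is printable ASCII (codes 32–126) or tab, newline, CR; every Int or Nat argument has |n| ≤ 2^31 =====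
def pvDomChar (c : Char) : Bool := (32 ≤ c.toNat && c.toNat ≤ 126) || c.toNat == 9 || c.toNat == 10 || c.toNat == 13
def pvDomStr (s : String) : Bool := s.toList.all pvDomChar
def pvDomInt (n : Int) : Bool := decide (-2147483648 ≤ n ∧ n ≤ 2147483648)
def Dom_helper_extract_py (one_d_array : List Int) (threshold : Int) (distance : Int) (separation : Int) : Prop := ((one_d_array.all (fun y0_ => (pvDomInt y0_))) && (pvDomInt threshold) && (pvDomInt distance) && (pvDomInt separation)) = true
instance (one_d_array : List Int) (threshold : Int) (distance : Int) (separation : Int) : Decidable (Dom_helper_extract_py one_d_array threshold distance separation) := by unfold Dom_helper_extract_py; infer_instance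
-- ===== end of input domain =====

-- B restructures A's single counter loop into run extraction followed by run classification (alternative decomposition, same cost).

-- ===== PORT A =====
-- A's for-loop over range(len(one_d_array)): structural recursion over the list carrying the
-- index i and the state (res, flag, temp); branches in A's order.
def goA (sep thr dist : Int) : List Int → Int → (List (Int × Int) × Int × Int) → (List (Int × Int) × Int × Int)
  | [], _, st => st
  | x :: xs, i, (res, flag, temp) =>
    if x < sep then
      if flag > thr then
        let start := i - flag
        let e := i
        goA sep thr dist xs (i + 1) ((if e - start > dist then res ++ [(start, e)] else res), 0, e)
      else
        goA sep thr dist xs (i + 1) (res, 0, temp)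
    else
      goA sep thr dist xs (i + 1) (res, flag + 1, temp)

-- A's for-else tail.
def finishA (n thr : Int) : (List (Int × Int) × Int × Int) → List (Int × Int)
  | (res, flag, temp) =>
    if flag > thr then
      let start := temp
      let e := n
      if e - start > 50 then res ++ [(start, e)] else res
    else res

def helper_extract_py (one_d_array : List Int) (threshold : Int) (distance : Int) (separation : Int) : List (Int × Int) :=
  let separation_threshold := separation * 255
  finishA (one_d_array.length : Int) threshold
    (goA separation_threshold threshold distance one_d_array 0 ([], 0, 0))

-- ===== PORT B =====
-- B's inner while loop: consume the leading high elements, return (end index, remaining list).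
def runEnd (sep : Int) : List Int → Int → Int × List Int
  | [], j => (j, [])
  | x :: xs, j => if x ≥ sep then runEnd sep xs (j + 1) else (j, x :: xs)

theorem runEnd_len_le (sep : Int) : ∀ (xs : List Int) (j : Int), (runEnd sep xs j).2.length ≤ xs.length := by
  intro xs
  induction xs with
  | nil => intro j; simp [runEnd]
  | cons x xs ih =>
    intro j
    simp only [runEnd]
    split
    · exact le_trans (ih (j + 1)) (by simp)
    · simp

-- B's outer while loop collecting the maximal runs as (start, end) pairs.
def runsGo (sep : Int) : List Int → Int → List (Int × Int)
  | [], _ => []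
  | x :: xs, i =>
    if x ≥ sep then
      (i, (runEnd sep xs (i + 1)).1) :: runsGo sep (runEnd sep xs (i + 1)).2 (runEnd sep xs (i + 1)).1
    else
      runsGo sep xs (i + 1)
  termination_by xs _ => xs.length
  decreasing_by
  · exact Nat.lt_succ_of_le (runEnd_len_le sep xs (i + 1))
  · simp

-- B's second pass over the runs, carrying (res, temp).
def bFold (n thr dist : Int) : List (Int × Int) → (List (Int × Int) × Int) → (List (Int × Int) × Int)
  | [], st => st
  | (s, e) :: rs, (res, temp) =>
    if e < n then
      if e - s > thr then
        bFold n thr dist rs ((if e - s > dist then res ++ [(s, e)] else res), e)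
      else
        bFold n thr dist rs (res, temp)
    else
      if e - s > thr ∧ n - temp > 50 then
        bFold n thr dist rs (res ++ [(temp, n)], temp)
      else
        bFold n thr dist rs (res, temp)

def helper_extract_py_alt (one_d_array : List Int) (threshold : Int) (distance : Int) (separation : Int) : List (Int × Int) :=
  let sep := separation * 255
  let n := (one_d_array.length : Int)
  (bFold n threshold distance (runsGo sep one_d_array 0) ([], 0)).1

-- ===== PRECONDITION & SPEC =====
-- Pre_ restricts to the natural domain threshold ≥ 0 (threshold is a run-length count, default 10):
-- for negative thresholds A treats every low element as the end of an empty "run" (flag = 0 > threshold),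
-- which B's run-based decomposition naturally has no counterpart for.
def Pre_helper_extract_py (one_d_array : List Int) (threshold : Int) (distance : Int) (separation : Int) : Prop :=
  0 ≤ threshold
instance (one_d_array : List Int) (threshold : Int) (distance : Int) (separation : Int) : Decidable (Pre_helper_extract_py one_d_array threshold distance separation) := by unfold Pre_helper_extract_py; infer_instance

def pvWitness_helper_extract_py : List Int × Int × Int × Int := ([0, 3000, 3000, 0, 2550], 1, 1, 10)

def Spec_helper_extract_py (one_d_array : List Int) (threshold : Int) (distance : Int) (separation : Int) (out : List (Int × Int)) : Prop := out = helper_extract_py_alt one_d_array threshold distance separation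
instance (one_d_array : List Int) (threshold : Int) (distance : Int) (separation : Int) (out : List (Int × Int)) : Decidable (Spec_helper_extract_py one_d_array threshold distance separation out) := by unfold Spec_helper_extract_py; infer_instance

-- ===== CLAIM (what is proved, stated in full; the proofs are below) =====
def Claim_equal_helper_extract_py : Prop := ∀ (one_d_array : List Int) (threshold : Int) (distance : Int) (separation : Int), Dom_helper_extract_py one_d_array threshold distance separation → Pre_helper_extract_py one_d_array threshold distance separation → Spec_helper_extract_py one_d_array threshold distance separation (helper_extract_py one_d_array threshold distance separation)

-- ===== LEMMAS AND PROOFS =====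

-- runEnd advances the index by exactly the number of elements it consumes.
theorem runEnd_len (sep : Int) : ∀ (xs : List Int) (j : Int),
    (runEnd sep xs j).1 + ((runEnd sep xs j).2.length : Int) = j + (xs.length : Int) := by
  intro xs
  induction xs with
  | nil => intro j; simp [runEnd]
  | cons x xs ih =>
    intro j
    simp only [runEnd]
    split
    · have := ih (j + 1)
      simp only [List.length_cons]
      push_cast at this ⊢
      omega
    · simp [List.length_cons]

theorem runEnd_ge (sep : Int) : ∀ (xs : List Int) (j : Int), j ≤ (runEnd sep xs j).1 := by
  intro xs
  induction xs with
  | nil => intro j; simp [runEnd]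
  | cons x xs ih =>
    intro j
    simp only [runEnd]
    split
    · exact le_trans (by omega) (ih (j + 1))
    · simp

-- the remainder after a run starts with a low element (or is empty).
theorem runEnd_head_low (sep : Int) : ∀ (xs : List Int) (j : Int),
    (runEnd sep xs j).2 = [] ∨ ∃ y ys, (runEnd sep xs j).2 = y :: ys ∧ y < sep := by
  intro xs
  induction xs with
  | nil => intro j; simp [runEnd]
  | cons x xs ih =>
    intro j
    simp only [runEnd]
    split
    · exact ih (j + 1)
    · right; exact ⟨x, xs, rfl, by omega⟩

-- A's loop through a block of high elements only increments flag.
theorem goA_run (sep thr dist : Int) : ∀ (xs : List Int) (j flag temp : Int) (res : List (Int × Int)),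
    goA sep thr dist xs j (res, flag, temp) =
      goA sep thr dist (runEnd sep xs j).2 (runEnd sep xs j).1 (res, flag + ((runEnd sep xs j).1 - j), temp) := by
  intro xs
  induction xs with
  | nil => intro j flag temp res; simp [runEnd]
  | cons x xs ih =>
    intro j flag temp res
    by_cases hx : x ≥ sep
    · have h1 : runEnd sep (x :: xs) j = runEnd sep xs (j + 1) := by simp [runEnd, hx]
      have h2 : goA sep thr dist (x :: xs) j (res, flag, temp)
          = goA sep thr dist xs (j + 1) (res, flag + 1, temp) := by
        simp [goA, show ¬ x < sep by omega]
      have e1 : flag + 1 + ((runEnd sep xs (j + 1)).1 - (j + 1)) = flag + ((runEnd sep xs (j + 1)).1 - j) := by ring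
      rw [h2, ih (j + 1) (flag + 1) temp res, e1, h1]
    · have h1 : runEnd sep (x :: xs) j = (j, x :: xs) := by simp [runEnd, hx]
      rw [h1]
      simp

-- Main invariant: A's scan (with a finished run, flag = 0) followed by the for-else tail equals
-- B's fold over the runs of the remaining suffix, provided the index bookkeeping i + |xs| = n holds.
theorem main_lemma (sep thr dist n : Int) (hthr : 0 ≤ thr) :
    ∀ (k : Nat) (xs : List Int) (i temp : Int) (res : List (Int × Int)),
      xs.length = k → i + (xs.length : Int) = n →
      finishA n thr (goA sep thr dist xs i (res, 0, temp)) =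
        (bFold n thr dist (runsGo sep xs i) (res, temp)).1 := by
  intro k
  induction k using Nat.strong_induction_on with
  | _ k ih =>
    intro xs i temp res hk hn
    match xs with
    | [] =>
      simp only [goA, runsGo, bFold, finishA]
      simp [show ¬ (0 : Int) > thr by omega]
    | x :: xs =>
      have hk' : xs.length + 1 = k := by simpa using hk
      have hn2 : i + (xs.length : Int) + 1 = n := by
        simp only [List.length_cons] at hn; push_cast at hn; omega
      by_cases hx : x < sep
      · -- low element with flag = 0: both sides skip it
        have hA : goA sep thr dist (x :: xs) i (res, 0, temp)
            = goA sep thr dist xs (i + 1) (res, 0, temp) := by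
          simp [goA, hx, show ¬ (0 : Int) > thr by omega]
        have hB : runsGo sep (x :: xs) i = runsGo sep xs (i + 1) := by
          rw [runsGo]; simp [show ¬ x ≥ sep by omega]
        rw [hA, hB]
        exact ih xs.length (by omega) xs (i + 1) temp res rfl (by omega)
      · -- a run starts here
        have hx' : x ≥ sep := by omega
        set p := runEnd sep xs (i + 1) with hp
        have hlen : p.1 + (p.2.length : Int) = (i + 1) + (xs.length : Int) := runEnd_len sep xs (i + 1)
        have hge : i + 1 ≤ p.1 := runEnd_ge sep xs (i + 1)
        have hplen : p.2.length ≤ xs.length := runEnd_len_le sep xs (i + 1)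
        have hA : goA sep thr dist (x :: xs) i (res, 0, temp)
            = goA sep thr dist p.2 p.1 (res, p.1 - i, temp) := by
          have h2 : goA sep thr dist (x :: xs) i (res, 0, temp)
              = goA sep thr dist xs (i + 1) (res, 0 + 1, temp) := by
            simp [goA, show ¬ x < sep by omega]
          have e2 : (0 : Int) + 1 + ((runEnd sep xs (i + 1)).1 - (i + 1)) = (runEnd sep xs (i + 1)).1 - i := by ring
          rw [h2, goA_run sep thr dist xs (i + 1) (0 + 1) temp res, e2, ← hp]
        have hB : runsGo sep (x :: xs) i = (i, p.1) :: runsGo sep p.2 p.1 := by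
          rw [runsGo]; simp [hx', ← hp]
        have hn' : p.1 + (p.2.length : Int) = n := by omega
        rcases runEnd_head_low sep xs (i + 1) with hnil | ⟨y, ys, heq, hy⟩
        · -- the run reaches the end of the array: p.1 = n
          rw [← hp] at hnil
          have hp1 : p.1 = n := by rw [hnil] at hn'; simpa using hn'
          rw [hA, hnil, hB, hnil]
          simp only [goA, runsGo, finishA, bFold, hp1]
          have : ¬ (n < n) := by omega
          simp only [this, if_false]
          by_cases h1 : n - i > thr
          · simp only [h1, if_true]
            by_cases h2 : n - temp > 50
            · simp [h2]
            · simp [h2]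
          · simp [h1]
        · -- the run is followed by a low element at index p.1
          rw [← hp] at heq
          have hyslen : (ys.length : Int) = n - p.1 - 1 := by
            rw [heq] at hn'; simp only [List.length_cons] at hn'; push_cast at hn'; omega
          have hplt : p.1 < n := by omega
          have hih : ∀ (temp' : Int) (res' : List (Int × Int)),
              finishA n thr (goA sep thr dist ys (p.1 + 1) (res', 0, temp')) =
                (bFold n thr dist (runsGo sep ys (p.1 + 1)) (res', temp')).1 := by
            intro temp' res'
            refine ih ys.length ?_ ys (p.1 + 1) temp' res' rfl (by omega)
            have hyl : ys.length < p.2.length := by rw [heq]; simp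
            omega
          rw [hA, heq, hB, heq]
          have hrunsB : runsGo sep (y :: ys) p.1 = runsGo sep ys (p.1 + 1) := by
            rw [runsGo]; simp [show ¬ y ≥ sep by omega]
          rw [hrunsB]
          simp only [goA, hy, if_true, bFold, hplt, if_true]
          by_cases h1 : p.1 - i > thr
          · have hstart : p.1 - (p.1 - i) = i := by omega
            simp only [h1, if_true, hstart]
            by_cases h2 : p.1 - i > dist
            · simp only [h2, if_true]
              exact hih p.1 (res ++ [(i, p.1)])
            · simp only [h2, if_false]
              exact hih p.1 res
          · simp only [h1, if_false]
            exact hih temp res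

-- ===== VERDICT (by name: the statement is the Claim_ definition above) =====
theorem helper_extract_py_spec : Claim_equal_helper_extract_py := by
  intro arr thr dist sepn _ hpre
  unfold Spec_helper_extract_py helper_extract_py helper_extract_py_alt
  exact main_lemma (sepn * 255) thr dist (arr.length : Int) hpre arr.length arr 0 0 [] rfl (by simp)
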